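-- pv_equiv track=rewrite | github.com/s-jinipark/pythonTest | COS_Lvl2/St2-1/D1/InitArray03.py | solution
-- ===== SOURCE A (Python) =====
-- def solution(row, col):
--     result = [[0 for _ in range(col)] for _ in range(row)]
--     num = 1
--
--     for r in range(row):
--         if r % 2 == 0:
--             for c in range(col):
--                 result[r][c] = num
--                 num+=1
--
--         else:
--             for c in range(col-1,-1,-1):
--                 result[r][c] = num
--                 num+=1
--
--     return result
-- ===== SOURCE B (Python) =====
-- def solution(row, col):
--     return [
--         [r * col + (c + 1 if r % 2 == 0 else col - c) for c in range(col)]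
--         for r in range(row)
--     ]
-- ===== Notes on version B (the rewrite author's own statement) =====
-- stated objective: simpler
-- what changed: Replaces the zero-matrix pre-allocation, in-place cell assignment and cross-cell running counter with a single nested comprehension computing each cell in closed form from its coordinates (base r*col plus c+1 or col-c by row parity).
import Mathlib
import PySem

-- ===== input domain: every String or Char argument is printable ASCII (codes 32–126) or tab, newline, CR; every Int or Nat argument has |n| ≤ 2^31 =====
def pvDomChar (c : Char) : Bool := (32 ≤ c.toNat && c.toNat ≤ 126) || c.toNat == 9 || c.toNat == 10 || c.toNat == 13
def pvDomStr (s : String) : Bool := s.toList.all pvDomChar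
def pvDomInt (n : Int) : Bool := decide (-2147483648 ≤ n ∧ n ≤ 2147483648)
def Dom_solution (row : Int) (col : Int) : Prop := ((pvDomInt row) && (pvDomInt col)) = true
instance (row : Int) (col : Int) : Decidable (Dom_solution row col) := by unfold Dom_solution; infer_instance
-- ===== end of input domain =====

-- B replaces A's zero matrix, in-place assignment and cross-cell running counter by a
-- closed-form per-cell comprehension (objective: simpler).

-- ===== PORT A =====
-- r and c taken from range(...) are nonnegative, so `.toNat` is the exact Python index.
def solution (row : Int) (col : Int) : List (List Int) :=
  ((PySem.List.pyRange 0 row 1).foldl (fun st r =>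
      if PySem.Int.mod r 2 == 0 then
        (PySem.List.pyRange 0 col 1).foldl
          (fun st c => (st.1.modify r.toNat (fun rw => rw.set c.toNat st.2), st.2 + 1)) st
      else
        (PySem.List.pyRange (col - 1) (-1) (-1)).foldl
          (fun st c => (st.1.modify r.toNat (fun rw => rw.set c.toNat st.2), st.2 + 1)) st)
    ((PySem.List.pyRange 0 row 1).map (fun _ =>
      (PySem.List.pyRange 0 col 1).map (fun _ => (0 : Int))), 1)).1

-- ===== PORT B =====
def solution_alt (row : Int) (col : Int) : List (List Int) :=
  (PySem.List.pyRange 0 row 1).map (fun r =>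
    (PySem.List.pyRange 0 col 1).map (fun c =>
      r * col + (if PySem.Int.mod r 2 == 0 then c + 1 else col - c)))

-- ===== PRECONDITION & SPEC =====
def Spec_solution (row : Int) (col : Int) (out : List (List Int)) : Prop := out = solution_alt row col
instance (row : Int) (col : Int) (out : List (List Int)) : Decidable (Spec_solution row col out) := by unfold Spec_solution; infer_instance

-- ===== CLAIM (what is proved, stated in full; the proofs are below) =====
def Claim_equal_solution : Prop := ∀ (row : Int) (col : Int), Dom_solution row col → Spec_solution row col (solution row col)

-- ===== LEMMAS AND PROOFS =====

-- the value of one row of B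
def targetRow (col : Int) (r : Int) : List Int :=
  (PySem.List.pyRange 0 col 1).map (fun c =>
    r * col + (if PySem.Int.mod r 2 == 0 then c + 1 else col - c))

-- one all-zero row of A's initial matrix
def zeroRow (col : Int) : List Int :=
  (PySem.List.pyRange 0 col 1).map (fun _ => (0 : Int))

-- A's inner loop acting on a single row
def fs : List Int → Int → List Int → List Int
  | [], _, rw => rw
  | c :: cs, n, rw => fs cs (n + 1) (rw.set c.toNat n)

theorem modify_modify_same {α : Type} (l : List α) (k : Nat) (f g : α → α) :
    (l.modify k f).modify k g = l.modify k (fun x => g (f x)) := by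
  induction l generalizing k with
  | nil => cases k <;> rfl
  | cons a l ih =>
    cases k with
    | zero => simp [List.modify]
    | succ k => simpa [List.modify] using ih k

theorem modify_append {α : Type} (xs : List α) (y : α) (ys : List α) (f : α → α) :
    (xs ++ y :: ys).modify xs.length f = xs ++ f y :: ys := by
  induction xs with
  | nil => simp [List.modify]
  | cons a xs ih => simpa [List.modify] using ih

theorem set_append {α : Type} (xs : List α) (y : α) (ys : List α) (v : α) :
    (xs ++ y :: ys).set xs.length v = xs ++ v :: ys := by
  induction xs with
  | nil => simp
  | cons a xs ih => simpa using ih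

-- A's inner matrix fold = modify row k by fs, and advance num by the range length
theorem fold_modify (cs : List Int) (k : Nat) (m : List (List Int)) (n : Int) :
    cs.foldl (fun st c => (st.1.modify k (fun rw => rw.set c.toNat st.2), st.2 + 1)) (m, n)
      = (m.modify k (fun rw => fs cs n rw), n + cs.length) := by
  induction cs generalizing m n with
  | nil =>
    simp only [List.foldl_nil, fs, List.length_nil, Nat.cast_zero, add_zero,
      show (fun rw : List Int => rw) = @id (List Int) from rfl, List.modify_id]
  | cons c cs ih =>
    simp only [List.foldl_cons, ih, modify_modify_same, fs, List.length_cons, Prod.mk.injEq]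
    exact ⟨trivial, by push_cast; ring⟩

theorem fs_even (m : Nat) : ∀ (n : Int) (pre zs : List Int), zs.length = m →
    fs (PySem.List.pyRange (pre.length) ((pre.length : Int) + (m : Int)) 1) n (pre ++ zs)
      = pre ++ (List.range m).map (fun i : Nat => n + (i : Int)) := by
  induction m with
  | zero =>
    intro n pre zs h
    have hnil : PySem.List.pyRange (pre.length) ((pre.length : Int) + ((0 : Nat) : Int)) 1 = [] :=
      PySem.List.pyRange_one_eq_nil (by push_cast; omega)
    rw [List.length_eq_zero_iff.mp h, hnil]
    simp [fs]
  | succ m ih =>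
    intro n pre zs h
    cases zs with
    | nil => simp at h
    | cons z zs =>
      have hcons : PySem.List.pyRange (pre.length) ((pre.length : Int) + ((m + 1 : Nat) : Int)) 1
          = (pre.length : Int) :: PySem.List.pyRange ((pre.length : Int) + 1) ((pre.length : Int) + ((m + 1 : Nat) : Int)) 1 :=
        PySem.List.pyRange_one_cons (by push_cast; omega)
      rw [hcons]
      simp only [fs, Int.toNat_natCast]
      rw [set_append]
      have h3 : (pre.length : Int) + 1 = ((pre ++ [n]).length : Int) := by simp
      have h2 : (pre.length : Int) + ((m + 1 : Nat) : Int) = ((pre ++ [n]).length : Int) + (m : Int) := by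
        simp; push_cast; ring
      rw [show pre ++ n :: zs = (pre ++ [n]) ++ zs by simp, h3, h2,
        ih (n + 1) (pre ++ [n]) zs (by simpa using h)]
      rw [List.range_succ_eq_map, List.map_cons, List.map_map]
      simp only [Nat.cast_zero, add_zero, List.append_assoc, List.singleton_append]
      congr 2
      exact List.map_congr_left (fun i _ => by simp [Function.comp]; push_cast; ring)

theorem fs_odd (m : Nat) : ∀ (n : Int) (ys zs : List Int), ys.length = m →
    fs (PySem.List.pyRange ((m : Int) - 1) (-1) (-1)) n (ys ++ zs)
      = (List.range m).map (fun i : Nat => n + ((m : Int) - 1 - (i : Int))) ++ zs := by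
  induction m with
  | zero =>
    intro n ys zs h
    have hnil : PySem.List.pyRange (((0 : Nat) : Int) - 1) (-1) (-1) = [] :=
      PySem.List.pyRange_neg_one_eq_nil (by omega)
    rw [List.length_eq_zero_iff.mp h, hnil]
    simp [fs]
  | succ m ih =>
    intro n ys zs h
    have hne : ys ≠ [] := by intro hn; simp [hn] at h
    have hlen : ys.dropLast.length = m := by simp [List.length_dropLast, h]
    have e1 : (((m + 1 : Nat) : Int) - 1) = (m : Int) := by push_cast; ring
    rw [e1, PySem.List.pyRange_neg_one_cons (by omega : (-1 : Int) < (m : Int))]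
    simp only [fs, Int.toNat_natCast]
    rw [show ys = ys.dropLast ++ [ys.getLast hne] from (List.dropLast_append_getLast hne).symm,
      List.append_assoc, List.singleton_append]
    have hset := set_append ys.dropLast (ys.getLast hne) zs n
    rw [hlen] at hset
    rw [hset, ih (n + 1) ys.dropLast (n :: zs) hlen]
    rw [List.range_succ]
    simp only [List.map_append, List.map_cons, List.map_nil, List.append_assoc,
      List.singleton_append, List.cons_append, List.nil_append]
    congr 1
    · exact List.map_congr_left (fun i _ => by push_cast; ring)
    · simp only [List.cons.injEq]
      exact ⟨by push_cast; ring, trivial⟩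

-- one step of A's outer loop turns the next zero row into targetRow
theorem step_row (col : Int) (R : Nat) (n : Int) (h : n = 1 + (R : Int) * (col.toNat : Int))
    (targets : List (List Int)) (hT : targets.length = R) (rest : List (List Int)) :
    (if PySem.Int.mod (R : Int) 2 == 0 then
        (PySem.List.pyRange 0 col 1).foldl
          (fun st c => (st.1.modify ((R : Int)).toNat (fun rw => rw.set c.toNat st.2), st.2 + 1)) (targets ++ zeroRow col :: rest, n)
      else
        (PySem.List.pyRange (col - 1) (-1) (-1)).foldl
          (fun st c => (st.1.modify ((R : Int)).toNat (fun rw => rw.set c.toNat st.2), st.2 + 1)) (targets ++ zeroRow col :: rest, n))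
      = (targets ++ targetRow col (R : Int) :: rest, n + (col.toNat : Int)) := by
  have hz : (zeroRow col).length = col.toNat := by
    simp [zeroRow, PySem.List.length_pyRange_one]
  by_cases hcol : col ≤ 0
  · have h0 : col.toNat = 0 := by omega
    have he : PySem.List.pyRange 0 col 1 = [] := PySem.List.pyRange_one_eq_nil (by omega)
    have ho : PySem.List.pyRange (col - 1) (-1) (-1) = [] := PySem.List.pyRange_neg_one_eq_nil (by omega)
    have hzr : zeroRow col = [] := by simp [zeroRow, he]
    have htr : targetRow col (R : Int) = [] := by simp [targetRow, he]
    split <;> simp [he, ho, hzr, htr, h0]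
  · push_neg at hcol
    have hc : ((col.toNat : Int)) = col := by omega
    split
    next hb =>
      rw [fold_modify _ _ _ n, Int.toNat_natCast, ← hT, modify_append, hT]
      have heq := fs_even col.toNat n [] (zeroRow col) hz
      simp only [List.length_nil, Nat.cast_zero, zero_add, List.nil_append, hc] at heq
      have hrow : fs (PySem.List.pyRange 0 col 1) n (zeroRow col) = targetRow col (R : Int) := by
        rw [heq, targetRow, show PySem.List.pyRange 0 col 1
            = PySem.List.pyRange 0 ((col.toNat : Int)) 1 by rw [hc],
          PySem.List.pyRange_zero_natCast, List.map_map]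
        exact List.map_congr_left (fun i _ => by
          simp only [Function.comp, hb, if_pos, h]
          rw [hc]; ring)
      simp only [Prod.mk.injEq, hrow]
      exact ⟨trivial, by simp [PySem.List.length_pyRange_one]⟩
    next hb =>
      rw [fold_modify _ _ _ n, Int.toNat_natCast, ← hT, modify_append, hT]
      have heq := fs_odd col.toNat n (zeroRow col) [] hz
      simp only [List.append_nil, hc] at heq
      have hrow : fs (PySem.List.pyRange (col - 1) (-1) (-1)) n (zeroRow col) = targetRow col (R : Int) := by
        rw [heq, targetRow, show PySem.List.pyRange 0 col 1
            = PySem.List.pyRange 0 ((col.toNat : Int)) 1 by rw [hc],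
          PySem.List.pyRange_zero_natCast, List.map_map]
        exact List.map_congr_left (fun i _ => by
          simp only [Function.comp, hb, h, Bool.false_eq_true, if_false]
          rw [hc]; ring)
      simp only [Prod.mk.injEq, hrow]
      exact ⟨trivial, by simp [PySem.List.length_pyRange_neg_one]⟩

theorem outer (col : Int) (R : Nat) (rest : List (List Int)) :
    (PySem.List.pyRange 0 (R : Int) 1).foldl (fun st r =>
      if PySem.Int.mod r 2 == 0 then
        (PySem.List.pyRange 0 col 1).foldl
          (fun st c => (st.1.modify r.toNat (fun rw => rw.set c.toNat st.2), st.2 + 1)) st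
      else
        (PySem.List.pyRange (col - 1) (-1) (-1)).foldl
          (fun st c => (st.1.modify r.toNat (fun rw => rw.set c.toNat st.2), st.2 + 1)) st)
      ((List.range R).map (fun _ => zeroRow col) ++ rest, 1)
      = ((List.range R).map (fun k : Nat => targetRow col (k : Int)) ++ rest, 1 + (R : Int) * (col.toNat : Int)) := by
  induction R generalizing rest with
  | zero =>
    have hnil : PySem.List.pyRange 0 ((0 : Int)) 1 = [] :=
      PySem.List.pyRange_one_eq_nil (by omega)
    simp only [Nat.cast_zero, hnil, List.foldl_nil, List.range_zero, List.map_nil,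
      List.nil_append, zero_mul, add_zero]
  | succ R ih =>
    have e : (((R + 1 : Nat)) : Int) = (R : Int) + 1 := by push_cast; ring
    rw [e, PySem.List.pyRange_one_succ_right (by omega), List.foldl_append, List.range_succ]
    simp only [List.map_append, List.map_cons, List.map_nil, List.append_assoc,
      List.singleton_append, List.cons_append, List.nil_append]
    rw [ih (zeroRow col :: rest)]
    simp only [List.foldl_cons, List.foldl_nil]
    rw [step_row col R (1 + (R : Int) * (col.toNat : Int)) rfl
      ((List.range R).map (fun k : Nat => targetRow col (k : Int))) (by simp) rest]
    simp only [Prod.mk.injEq]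
    exact ⟨trivial, by push_cast; ring⟩

theorem solution_eq_alt (row col : Int) : solution row col = solution_alt row col := by
  by_cases hrow : row ≤ 0
  · have hnil : PySem.List.pyRange 0 row 1 = [] := PySem.List.pyRange_one_eq_nil hrow
    simp [solution, solution_alt, hnil]
  · push_neg at hrow
    have hR : ((row.toNat : Nat) : Int) = row := by omega
    unfold solution solution_alt
    rw [← hR, PySem.List.pyRange_zero_natCast, List.map_map]
    have hinit : (List.range row.toNat).map ((fun _ =>
        (PySem.List.pyRange 0 col 1).map (fun _ => (0 : Int))) ∘ (fun k : Nat => (k : Int)))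
        = (List.range row.toNat).map (fun _ => zeroRow col) ++ [] := by
      rw [List.append_nil]
      exact List.map_congr_left (fun k _ => rfl)
    rw [hinit]
    have h2 := outer col row.toNat []
    rw [PySem.List.pyRange_zero_natCast] at h2
    rw [h2]
    simp only [List.append_nil, List.map_map]
    exact List.map_congr_left (fun k _ => rfl)

-- ===== VERDICT (by name: the statement is the Claim_ definition above) =====
theorem solution_spec : Claim_equal_solution := by
  intro row col _
  unfold Spec_solution
  exact solution_eq_alt row col
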